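-- pv_equiv track=rewrite | github.com/krukmat/diet-intel | app/services/taste_learning.py | _detect_dietary_ingredient_patterns
-- ===== SOURCE A (Python) =====
-- from typing import Dict, List, Optional, Any, Tuple
--
-- def _detect_dietary_ingredient_patterns(categorized: Dict[str, List[str]]) -> List[str]:
--     """Detect dietary patterns based on ingredient preferences"""
--     patterns = []
--
--     # Check for vegetarian indicators
--     plant_proteins = ['tofu', 'beans', 'lentils', 'chickpeas', 'quinoa']
--     loved_plant_proteins = sum(1 for ingredient in categorized['loved']
--                              if any(protein in ingredient for protein in plant_proteins))
--
--     if loved_plant_proteins >= 2: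
--         patterns.append('vegetarian_leaning')
--
--     # Check for health-conscious indicators
--     healthy_ingredients = ['olive oil', 'avocado', 'quinoa', 'spinach', 'kale']
--     loved_healthy = sum(1 for ingredient in categorized['loved']
--                        if any(healthy in ingredient for healthy in healthy_ingredients))
--
--     if loved_healthy >= 2:
--         patterns.append('health_conscious')
--
--     # Check for comfort food indicators
--     comfort_ingredients = ['cheese', 'butter', 'cream', 'bacon']
--     loved_comfort = sum(1 for ingredient in categorized['loved']
--                        if any(comfort in ingredient for comfort in comfort_ingredients))
--
--     if loved_comfort >= 2:
--         patterns.append('comfort_food_lover')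
--
--     return patterns
-- ===== SOURCE B (Python) =====
-- def _detect_dietary_ingredient_patterns(categorized):
--     """Single pass over loved ingredients with three counters (instead of three scans)."""
--     plant = ('tofu', 'beans', 'lentils', 'chickpeas', 'quinoa')
--     healthy = ('olive oil', 'avocado', 'quinoa', 'spinach', 'kale')
--     comfort = ('cheese', 'butter', 'cream', 'bacon')
--     p = h = c = 0
--     for ingredient in categorized['loved']:
--         if any(k in ingredient for k in plant):
--             p += 1
--         if any(k in ingredient for k in healthy):
--             h += 1
--         if any(k in ingredient for k in comfort):
--             c += 1
--     patterns = []
--     if p >= 2: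
--         patterns.append('vegetarian_leaning')
--     if h >= 2:
--         patterns.append('health_conscious')
--     if c >= 2:
--         patterns.append('comfort_food_lover')
--     return patterns
-- ===== Notes on version B (the rewrite author's own statement) =====
-- stated objective: alternative
-- what changed: B replaces A's three separate generator-scans over categorized['loved'] (one per keyword family) by one loop that maintains three counters and builds the pattern list afterwards.
import Mathlib
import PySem

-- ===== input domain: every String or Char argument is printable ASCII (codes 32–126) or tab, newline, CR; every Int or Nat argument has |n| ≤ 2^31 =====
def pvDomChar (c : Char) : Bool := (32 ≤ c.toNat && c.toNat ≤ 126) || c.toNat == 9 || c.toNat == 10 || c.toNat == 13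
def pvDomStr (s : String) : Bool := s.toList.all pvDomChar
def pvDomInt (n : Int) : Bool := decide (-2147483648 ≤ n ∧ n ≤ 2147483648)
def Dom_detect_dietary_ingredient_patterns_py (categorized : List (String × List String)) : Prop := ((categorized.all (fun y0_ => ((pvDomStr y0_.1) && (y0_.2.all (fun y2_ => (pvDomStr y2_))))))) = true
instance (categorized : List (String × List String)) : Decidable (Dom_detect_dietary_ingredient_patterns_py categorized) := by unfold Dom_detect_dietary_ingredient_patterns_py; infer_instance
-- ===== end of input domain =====

-- B merges A's three separate scans of categorized['loved'] into one loop keeping three counters (objective: alternative decomposition, same cost class).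

-- ===== PORT A =====
-- sum(1 for ingredient in loved if any(kw in ingredient for kw in kws))
def pvACount (kws : List String) (loved : List String) : Int :=
  loved.foldl (fun acc ingredient =>
    if kws.any (fun kw => PySem.Str.isIn kw ingredient) then acc + 1 else acc) 0

def detect_dietary_ingredient_patterns_py (categorized : List (String × List String)) : List String :=
  match categorized.find? (fun p => p.1 == "loved") with
  | none => []  -- KeyError in Python; excluded by Pre_
  | some entry =>
    let loved := entry.2
    let patterns : List String := []
    let patterns := if pvACount ["tofu", "beans", "lentils", "chickpeas", "quinoa"] loved ≥ 2
      then patterns ++ ["vegetarian_leaning"] else patterns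
    let patterns := if pvACount ["olive oil", "avocado", "quinoa", "spinach", "kale"] loved ≥ 2
      then patterns ++ ["health_conscious"] else patterns
    let patterns := if pvACount ["cheese", "butter", "cream", "bacon"] loved ≥ 2
      then patterns ++ ["comfort_food_lover"] else patterns
    patterns

-- ===== PORT B =====
-- any(k in ingredient for k in kws)
def pvBHit (ingredient : String) (kws : List String) : Bool :=
  kws.any (fun k => PySem.Str.isIn k ingredient)

def detect_dietary_ingredient_patterns_py_alt (categorized : List (String × List String)) : List String :=
  match categorized.find? (fun p => p.1 == "loved") with
  | none => []  -- KeyError in Python; excluded by Pre_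
  | some entry =>
    let counts : Int × Int × Int := entry.2.foldl (fun acc ingredient =>
      (acc.1 + (if pvBHit ingredient ["tofu", "beans", "lentils", "chickpeas", "quinoa"] then 1 else 0),
       acc.2.1 + (if pvBHit ingredient ["olive oil", "avocado", "quinoa", "spinach", "kale"] then 1 else 0),
       acc.2.2 + (if pvBHit ingredient ["cheese", "butter", "cream", "bacon"] then 1 else 0))) (0, 0, 0)
    (if counts.1 ≥ 2 then ["vegetarian_leaning"] else []) ++
    (if counts.2.1 ≥ 2 then ["health_conscious"] else []) ++
    (if counts.2.2 ≥ 2 then ["comfort_food_lover"] else [])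

-- ===== PRECONDITION & SPEC =====
-- Pre_ excludes only dicts without the key 'loved', on which Python raises KeyError.
def Pre_detect_dietary_ingredient_patterns_py (categorized : List (String × List String)) : Prop :=
  "loved" ∈ categorized.map Prod.fst
instance (categorized : List (String × List String)) : Decidable (Pre_detect_dietary_ingredient_patterns_py categorized) := by unfold Pre_detect_dietary_ingredient_patterns_py; infer_instance

def pvWitness_detect_dietary_ingredient_patterns_py : (List (String × List String)) :=
  [("loved", ["tofu salad", "black beans"])]

def Spec_detect_dietary_ingredient_patterns_py (categorized : List (String × List String)) (out : List String) : Prop := out = detect_dietary_ingredient_patterns_py_alt categorized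
instance (categorized : List (String × List String)) (out : List String) : Decidable (Spec_detect_dietary_ingredient_patterns_py categorized out) := by unfold Spec_detect_dietary_ingredient_patterns_py; infer_instance

-- ===== CLAIM (what is proved, stated in full; the proofs are below) =====
def Claim_equal_detect_dietary_ingredient_patterns_py : Prop := ∀ (categorized : List (String × List String)), Dom_detect_dietary_ingredient_patterns_py categorized → Pre_detect_dietary_ingredient_patterns_py categorized → Spec_detect_dietary_ingredient_patterns_py categorized (detect_dietary_ingredient_patterns_py categorized)

-- ===== LEMMAS AND PROOFS =====

-- A's generator-sum over a cons list.
theorem pvACount_cons (kws : List String) (x : String) (xs : List String) :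
    pvACount kws (x :: xs)
      = (if kws.any (fun kw => PySem.Str.isIn kw x) then 1 else 0) + pvACount kws xs := by
  suffices h : ∀ (i : Int) (ys : List String),
      ys.foldl (fun acc ingredient =>
        if kws.any (fun kw => PySem.Str.isIn kw ingredient) then acc + 1 else acc) i
      = i + ys.foldl (fun acc ingredient =>
        if kws.any (fun kw => PySem.Str.isIn kw ingredient) then acc + 1 else acc) 0 by
    simp only [pvACount, List.foldl_cons]
    split_ifs
    · rw [h (0 + 1)]; omega
    · omega
  intro i ys
  induction ys generalizing i with
  | nil => simp
  | cons y ys ihy =>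
    simp only [List.foldl_cons]
    split_ifs with hy
    · rw [ihy (i + 1), ihy (0 + 1)]; omega
    · exact ihy i

-- B's single fold computes A's three counts, shifted by the initial accumulator.
theorem pvFold_eq_counts (loved : List String) (a b c : Int) :
    loved.foldl (fun acc ingredient =>
      (acc.1 + (if pvBHit ingredient ["tofu", "beans", "lentils", "chickpeas", "quinoa"] then 1 else 0),
       acc.2.1 + (if pvBHit ingredient ["olive oil", "avocado", "quinoa", "spinach", "kale"] then 1 else 0),
       acc.2.2 + (if pvBHit ingredient ["cheese", "butter", "cream", "bacon"] then 1 else 0))) (a, b, c)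
    = (a + pvACount ["tofu", "beans", "lentils", "chickpeas", "quinoa"] loved,
       b + pvACount ["olive oil", "avocado", "quinoa", "spinach", "kale"] loved,
       c + pvACount ["cheese", "butter", "cream", "bacon"] loved) := by
  induction loved generalizing a b c with
  | nil => simp [pvACount]
  | cons x xs ih =>
    simp only [List.foldl_cons]
    rw [ih, pvACount_cons, pvACount_cons, pvACount_cons]
    simp only [pvBHit, Prod.mk.injEq]
    split_ifs <;> refine ⟨by omega, by omega, by omega⟩

-- ===== VERDICT (by name: the statement is the Claim_ definition above) =====
theorem detect_dietary_ingredient_patterns_py_spec : Claim_equal_detect_dietary_ingredient_patterns_py := by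
  intro categorized _ _
  unfold Spec_detect_dietary_ingredient_patterns_py
  unfold detect_dietary_ingredient_patterns_py detect_dietary_ingredient_patterns_py_alt
  cases h : categorized.find? (fun p => p.1 == "loved") with
  | none => rfl
  | some entry =>
    simp only [pvFold_eq_counts, zero_add]
    by_cases h1 : pvACount ["tofu", "beans", "lentils", "chickpeas", "quinoa"] entry.2 ≥ 2 <;>
    by_cases h2 : pvACount ["olive oil", "avocado", "quinoa", "spinach", "kale"] entry.2 ≥ 2 <;>
    by_cases h3 : pvACount ["cheese", "butter", "cream", "bacon"] entry.2 ≥ 2 <;>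
      simp [h1, h2, h3]
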